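-- pv_equiv track=rewrite | github.com/EugeneChecheta/LUTOhayse.bots | Script_VK_LutoClientBot.py | get_module_codes_from_sofa_code
-- ===== SOURCE A (Python) =====
-- from typing import List, Dict, Optional, Any, Tuple
--
-- PREFIX_TO_MODULE_LETTER = {
--     'CA': 'A',
--     'CP': 'P',
--     'CT': 'T'
-- }
--
-- def split_sofa_code(sofa_code: str) -> Tuple[str, List[str]]:
--     """Разбивает код дивана на префикс (CA/CP/CT) и список двузначных суффиксов."""
--     if len(sofa_code) < 4 or sofa_code[0] != 'C':
--         return '', []
--     prefix = sofa_code[:2]  # CA, CP, CT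
--     if prefix not in PREFIX_TO_MODULE_LETTER:
--         return '', []
--     rest = sofa_code[2:]
--     if len(rest) % 2 != 0:
--         return '', []
--     suffixes = [rest[i:i+2] for i in range(0, len(rest), 2)]
--     return prefix, suffixes
--
-- def get_module_codes_from_sofa_code(sofa_code: str) -> List[str]:
--     """Возвращает список кодов модулей (например, ['A02','A01']) для данного дивана."""
--     prefix, suffixes = split_sofa_code(sofa_code)
--     if not prefix:
--         return []
--     letter = PREFIX_TO_MODULE_LETTER.get(prefix)
--     if not letter:
--         return []
--     return [f"{letter}{suffix}" for suffix in suffixes]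
-- ===== SOURCE B (Python) =====
-- def _pair_codes(letter, cs):
--     """Consume cs two characters at a time, prefixing each pair with letter;
--     None if an odd character is left over."""
--     if not cs:
--         return []
--     if len(cs) == 1:
--         return None
--     rest = _pair_codes(letter, cs[2:])
--     if rest is None:
--         return None
--     return [letter + cs[0] + cs[1]] + rest
--
-- def get_module_codes_from_sofa_code(sofa_code):
--     chars = list(sofa_code)
--     if len(chars) < 4 or chars[0] != 'C' or chars[1] not in ('A', 'P', 'T'):
--         return []
--     out = _pair_codes(chars[1], chars[2:])
--     return out if out is not None else []
-- ===== Notes on version B (the rewrite author's own statement) =====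
-- stated objective: alternative
-- what changed: Replaces the slice/dict helper pipeline (prefix table lookup, parity test, range-step-2 slicing comprehension) by a direct recursion that validates the prefix on the character list and consumes the remaining characters two at a time, failing to None on an odd leftover.
import Mathlib
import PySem

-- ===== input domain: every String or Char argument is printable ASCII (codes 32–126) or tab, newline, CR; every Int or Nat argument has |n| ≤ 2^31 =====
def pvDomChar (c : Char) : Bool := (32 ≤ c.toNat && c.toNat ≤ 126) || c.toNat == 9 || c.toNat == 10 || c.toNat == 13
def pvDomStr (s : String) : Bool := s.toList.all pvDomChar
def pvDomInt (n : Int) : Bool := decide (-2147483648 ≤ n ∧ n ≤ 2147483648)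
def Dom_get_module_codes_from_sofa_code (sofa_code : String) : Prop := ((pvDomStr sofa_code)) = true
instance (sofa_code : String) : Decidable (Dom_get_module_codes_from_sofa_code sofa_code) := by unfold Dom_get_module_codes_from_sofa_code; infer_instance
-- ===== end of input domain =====

-- B replaces A's slice/dict helper pipeline by a direct two-characters-at-a-time recursion; alternative decomposition, same cost.


-- ===== PORT A =====
-- PREFIX_TO_MODULE_LETTER
def pvPrefixToModuleLetter : PySem.Dict String String :=
  PySem.Dict.ofList [("CA", "A"), ("CP", "P"), ("CT", "T")]

def split_sofa_code (sofa_code : String) : String × List String :=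
  if PySem.Str.len sofa_code < 4 ∨ ¬ (PySem.Str.pyGet? sofa_code 0 = some 'C') then ("", [])
  else
    let pre := PySem.Str.slice sofa_code none (some 2)
    -- 'prefix not in PREFIX_TO_MODULE_LETTER' = key lookup finds nothing
    if pvPrefixToModuleLetter.get? pre = none then ("", [])
    else
      let rest := PySem.Str.slice sofa_code (some 2) none
      if ¬ (PySem.Int.mod (PySem.Str.len rest) 2 = 0) then ("", [])
      else
        (pre, (PySem.List.pyRange 0 (PySem.Str.len rest) 2).map
          (fun i => PySem.Str.slice rest (some i) (some (i + 2))))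

def get_module_codes_from_sofa_code (sofa_code : String) : List String :=
  let p := split_sofa_code sofa_code
  if p.1 = "" then []
  else
    match pvPrefixToModuleLetter.get? p.1 with
    | none => []
    | some letter =>
      if letter = "" then []  -- 'if not letter'
      else
        -- f"{letter}{suffix}" : concatenation, exact on the char-list side
        p.2.map (fun suffix => String.ofList (letter.toList ++ suffix.toList))

-- ===== PORT B =====
def pvPairCodes (letter : Char) (cs : List Char) : Option (List String) :=
  match cs with
  | [] => some []
  | [_] => none
  | a :: b :: t =>
    match pvPairCodes letter t with
    | none => none
    | some rest => some (String.ofList [letter, a, b] :: rest)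

def get_module_codes_from_sofa_code_alt (sofa_code : String) : List String :=
  match sofa_code.toList with
  | c0 :: c1 :: c2 :: c3 :: t =>
    if c0 = 'C' ∧ (c1 = 'A' ∨ c1 = 'P' ∨ c1 = 'T') then
      match pvPairCodes c1 (c2 :: c3 :: t) with
      | some out => out
      | none => []
    else []
  | _ => []

-- ===== PRECONDITION & SPEC =====
def Spec_get_module_codes_from_sofa_code (sofa_code : String) (out : List String) : Prop := out = get_module_codes_from_sofa_code_alt sofa_code
instance (sofa_code : String) (out : List String) : Decidable (Spec_get_module_codes_from_sofa_code sofa_code out) := by unfold Spec_get_module_codes_from_sofa_code; infer_instance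

-- ===== CLAIM (what is proved, stated in full; the proofs are below) =====
def Claim_equal_get_module_codes_from_sofa_code : Prop := ∀ (sofa_code : String), Dom_get_module_codes_from_sofa_code sofa_code → Spec_get_module_codes_from_sofa_code sofa_code (get_module_codes_from_sofa_code sofa_code)

-- ===== LEMMAS AND PROOFS =====

-- the prefix dict, evaluated
lemma pvDict_get (p : String) : pvPrefixToModuleLetter.get? p =
    if p = "CA" then some "A" else if p = "CP" then some "P" else if p = "CT" then some "T" else none := by
  simp only [pvPrefixToModuleLetter, PySem.Dict.ofList, PySem.Dict.get?, PySem.Dict.empty,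
    PySem.Dict.update, PySem.Dict.insert]
  by_cases h1 : p = "CA" <;> by_cases h2 : p = "CP" <;> by_cases h3 : p = "CT" <;>
    simp [beq_eq_decide, h1, h2, h3]
  exact ⟨fun h => h1 h.symm, fun h => h2 h.symm, fun h => h3 h.symm⟩

-- odd length: B's pairing fails
lemma pvPairCodes_odd (l : Char) (t : List Char) (h : t.length % 2 = 1) :
    pvPairCodes l t = none := by
  induction t using pvPairCodes.induct l with
  | case1 => simp at h
  | case2 _ => rfl
  | case3 a b t hnone _ => simp [pvPairCodes, hnone]
  | case4 a b t rest hsome ih =>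
    simp at h
    rw [ih (by omega)] at hsome
    cases hsome

-- even length: B's pairing equals the take-2/drop-2k enumeration
lemma pvPairCodes_even (m : Nat) (l : Char) : ∀ (t : List Char), t.length = 2 * m →
    pvPairCodes l t = some ((List.range m).map
      (fun k => String.ofList (l :: (t.drop (2 * k)).take 2))) := by
  induction m with
  | zero =>
    intro t ht
    rw [List.length_eq_zero_iff.mp ht]
    rfl
  | succ m ih =>
    intro t ht
    match t with
    | [] => simp at ht
    | [a] => simp at ht; omega
    | a :: b :: t' =>
      have ht' : t'.length = 2 * m := by simp at ht; omega
      simp only [pvPairCodes, ih t' ht']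
      simp only [List.range_succ_eq_map, List.map_cons, List.map_map]
      refine congrArg some ?_
      refine List.cons_eq_cons.mpr ⟨rfl, ?_⟩
      refine List.map_congr_left (fun k _ => ?_)
      simp only [Function.comp]
      have h3 : 2 * Nat.succ k = 2 * k + 1 + 1 := by omega
      rw [h3]
      simp [List.drop_succ_cons]

-- A's step-2 range of slices, in Nat form
lemma A_side (l : Char) (t : List Char) :
    (PySem.List.pyRange 0 (t.length : Int) 2).map
      (fun i => String.ofList (l :: PySem.List.slice t (some i) (some (i + 2)))) =
    (List.range ((t.length + 1) / 2)).map
      (fun k => String.ofList (l :: (t.drop (2 * k)).take 2)) := by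
  rw [PySem.List.pyRange_of_pos 0 (t.length : Int) (by norm_num), List.map_map]
  have hcount : (if (0:Int) < (t.length : Int) then (((t.length : Int) - 0 + 2 - 1) / 2).toNat else 0)
      = (t.length + 1) / 2 := by split_ifs with h <;> omega
  rw [hcount]
  refine List.map_congr_left (fun k _ => ?_)
  simp only [Function.comp]
  have h1 : (0:Int) + 2*(k:Int) = ((2*k : Nat) : Int) := by push_cast; ring
  have h2 : ((2*k : Nat) : Int) + 2 = ((2*k+2 : Nat) : Int) := by push_cast; ring
  rw [h1, h2, PySem.List.slice_natCast]
  have h3 : 2 * k + 2 - 2 * k = 2 := by omega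
  rw [h3]

-- A's range-of-slices comprehension equals B's pairing, on an even-length tail
lemma AB_main (l : Char) (r : List Char) (hp : r.length % 2 = 0) :
    (PySem.List.pyRange 0 (r.length : Int) 2).map
      (fun i => String.ofList (l :: PySem.List.slice r (some i) (some (i + 2)))) =
    (match pvPairCodes l r with | some out => out | none => []) := by
  obtain ⟨m, hm⟩ : ∃ m, r.length = 2 * m := ⟨r.length / 2, by omega⟩
  rw [A_side, pvPairCodes_even m l r hm]
  have hc : (r.length + 1) / 2 = m := by omega
  rw [hc]

-- ===== VERDICT (by name: the statement is the Claim_ definition above) =====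
theorem get_module_codes_from_sofa_code_spec : Claim_equal_get_module_codes_from_sofa_code := by
  intro s _
  unfold Spec_get_module_codes_from_sofa_code
  match hcs : s.toList with
  | [] =>
    simp [get_module_codes_from_sofa_code, get_module_codes_from_sofa_code_alt,
      split_sofa_code, hcs]
  | [c0] =>
    simp [get_module_codes_from_sofa_code, get_module_codes_from_sofa_code_alt,
      split_sofa_code, hcs]
  | [c0, c1] =>
    simp [get_module_codes_from_sofa_code, get_module_codes_from_sofa_code_alt,
      split_sofa_code, hcs]
  | [c0, c1, c2] =>
    simp [get_module_codes_from_sofa_code, get_module_codes_from_sofa_code_alt,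
      split_sofa_code, hcs]
  | c0 :: c1 :: c2 :: c3 :: t =>
    have hlen : PySem.Str.len s = (t.length : Int) + 4 := by
      simp [PySem.Str.len_eq, hcs]
      ring
    have hget : PySem.Str.pyGet? s 0 = some c0 := by
      simp [PySem.Str.pyGet?, hcs, PySem.Chars.pyGet?]
    have hpre : PySem.Str.slice s none (some 2) = String.ofList [c0, c1] := by
      simp only [PySem.Str.slice, hcs]
      rfl
    have hrest : PySem.Str.slice s (some 2) none = String.ofList (c2 :: c3 :: t) := by
      simp only [PySem.Str.slice, hcs, PySem.Chars.slice]
      rw [PySem.List.slice_from _ (by norm_num : (0:Int) ≤ 2)]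
      rfl
    have hrlen : PySem.Str.len (String.ofList (c2 :: c3 :: t)) = ((c2 :: c3 :: t).length : Int) := by
      rw [PySem.Str.len_eq, String.toList_ofList]
    have hmod : PySem.Int.mod ((c2 :: c3 :: t).length : Int) 2 = ((c2 :: c3 :: t).length : Int) % 2 :=
      PySem.Int.mod_eq_emod_of_pos (by norm_num)
    by_cases h0 : c0 = 'C'
    · subst h0
      by_cases hL : c1 = 'A' ∨ c1 = 'P' ∨ c1 = 'T'
      · -- valid prefix: both produce the module codes; split on parity of the tail
        have key : ∀ (ls : String), ls.toList = [c1] →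
            pvPrefixToModuleLetter.get? (String.ofList ['C', c1]) = some ls →
            get_module_codes_from_sofa_code s = get_module_codes_from_sofa_code_alt s := by
          intro ls hls hd
          have hls_ne : ¬ (ls = "") := by
            rw [String.ext_iff, hls]
            simp
          have hpre_ne : ¬ (String.ofList ['C', c1] = "") := by
            rw [String.ext_iff, String.toList_ofList]
            simp
          have hlt : ¬ ((t.length : Int) + 4 < 4) := by omega
          by_cases hp : ((c2 :: c3 :: t).length) % 2 = 0
          · have hpz : ((c2 :: c3 :: t).length : Int) % 2 = 0 := by omega
            simp only [get_module_codes_from_sofa_code, split_sofa_code, hlen, hget, hpre, hrest,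
              hd, hrlen, hmod, hlt, hpz, hls_ne, hpre_ne, not_true, or_false,
              if_false, reduceCtorEq]
            rw [hls, List.map_map]
            simp only [get_module_codes_from_sofa_code_alt, hcs]
            rw [if_pos (show True ∧ (c1 = 'A' ∨ c1 = 'P' ∨ c1 = 'T') from ⟨trivial, hL⟩)]
            rw [← AB_main c1 (c2 :: c3 :: t) hp]
            refine List.map_congr_left (fun i _ => ?_)
            simp [Function.comp, PySem.Str.slice, PySem.Chars.slice, String.toList_ofList]
          · have hpz : ¬ (((c2 :: c3 :: t).length : Int) % 2 = 0) := by omega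
            simp only [get_module_codes_from_sofa_code, split_sofa_code, hlen, hget, hpre, hrest,
              hd, hrlen, hmod, hlt, hpz, not_true, or_false, if_false, not_false_eq_true, if_true]
            simp only [get_module_codes_from_sofa_code_alt, hcs]
            rw [if_pos (show True ∧ (c1 = 'A' ∨ c1 = 'P' ∨ c1 = 'T') from ⟨trivial, hL⟩)]
            rw [pvPairCodes_odd c1 (c2 :: c3 :: t) (by omega)]
            simp
        rcases hL with h1 | h1 | h1
        · subst h1
          exact key "A" (by decide)
            (by rw [pvDict_get, if_pos (by decide : String.ofList ['C', 'A'] = "CA")])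
        · subst h1
          refine key "P" (by decide) ?_
          rw [pvDict_get, if_neg (by decide : ¬ (String.ofList ['C', 'P'] = "CA")),
            if_pos (by decide : String.ofList ['C', 'P'] = "CP")]
        · subst h1
          refine key "T" (by decide) ?_
          rw [pvDict_get, if_neg (by decide : ¬ (String.ofList ['C', 'T'] = "CA")),
            if_neg (by decide : ¬ (String.ofList ['C', 'T'] = "CP")),
            if_pos (by decide : String.ofList ['C', 'T'] = "CT")]
      · -- prefix not one of CA/CP/CT: A's dict lookup misses, B's guard fails
        have hd : pvPrefixToModuleLetter.get? (String.ofList ['C', c1]) = none := by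
          rw [pvDict_get]
          have e1 : ¬ (String.ofList ['C', c1] = "CA") := by
            rw [String.ext_iff, String.toList_ofList]
            intro h
            exact hL (Or.inl (List.cons_eq_cons.mp (List.cons_eq_cons.mp h).2).1)
          have e2 : ¬ (String.ofList ['C', c1] = "CP") := by
            rw [String.ext_iff, String.toList_ofList]
            intro h
            exact hL (Or.inr (Or.inl (List.cons_eq_cons.mp (List.cons_eq_cons.mp h).2).1))
          have e3 : ¬ (String.ofList ['C', c1] = "CT") := by
            rw [String.ext_iff, String.toList_ofList]
            intro h
            exact hL (Or.inr (Or.inr (List.cons_eq_cons.mp (List.cons_eq_cons.mp h).2).1))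
          rw [if_neg e1, if_neg e2, if_neg e3]
        simp only [get_module_codes_from_sofa_code, split_sofa_code, hlen, hget, hpre, hd]
        simp [get_module_codes_from_sofa_code_alt, hcs, hL]
    · -- first character is not 'C'
      have hc : PySem.Str.len s < 4 ∨ ¬ (PySem.Str.pyGet? s 0 = some 'C') := by
        rw [hlen, hget]
        right
        simp [h0]
      simp only [get_module_codes_from_sofa_code, split_sofa_code, if_pos hc]
      simp [get_module_codes_from_sofa_code_alt, hcs, h0]
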